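-- pv_equiv track=rewrite | github.com/mango606/baekjoon-hub | 백준/Silver/25192. 인사성 밝은 곰곰이/인사성 밝은 곰곰이.py | count_greetings
-- ===== SOURCE A (Python) =====
-- def count_greetings(logs):
--     greeted_people = set()
--     total_greetings = 0
--
--     for log in logs:
--         if log == "ENTER":
--             total_greetings += len(greeted_people)
--             greeted_people.clear()
--         else:
--             greeted_people.add(log)
--
--     total_greetings += len(greeted_people)
--
--     return total_greetings
-- ===== SOURCE B (Python) =====
-- def count_greetings(logs):
--     # Two-phase: split logs into ENTER-delimited sessions, then sum distinct counts.
--     sessions = []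
--     current = []
--     for log in logs:
--         if log == "ENTER":
--             sessions.append(current)
--             current = []
--         else:
--             current.append(log)
--     sessions.append(current)
--     return sum(len(set(session)) for session in sessions)
-- ===== Notes on version B (the rewrite author's own statement) =====
-- stated objective: alternative
-- what changed: B first splits the log into ENTER-delimited sessions as an explicit list of lists, then in a separate pass sums the number of distinct greetings per session, instead of interleaving a running set with a running total.
import Mathlib
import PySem

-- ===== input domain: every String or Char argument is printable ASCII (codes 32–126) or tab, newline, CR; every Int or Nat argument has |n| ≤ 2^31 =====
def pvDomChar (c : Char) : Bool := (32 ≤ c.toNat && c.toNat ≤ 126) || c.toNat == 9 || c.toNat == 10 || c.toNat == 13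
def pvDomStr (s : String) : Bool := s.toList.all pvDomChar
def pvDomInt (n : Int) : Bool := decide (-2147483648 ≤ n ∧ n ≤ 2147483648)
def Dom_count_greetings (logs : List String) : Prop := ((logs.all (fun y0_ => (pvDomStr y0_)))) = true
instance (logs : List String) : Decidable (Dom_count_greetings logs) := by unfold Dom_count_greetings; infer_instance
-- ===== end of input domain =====

-- B splits the log into ENTER-delimited sessions first, then sums distinct counts per session (alternative decomposition, same cost).


-- ===== PORT A =====
-- literal port of A: one fold maintaining (greeted_people : Set, total_greetings : Int)
def count_greetings (logs : List String) : Int :=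
  let st := logs.foldl
    (fun (st : PySem.Set String × Int) log =>
      if log == "ENTER" then (PySem.Set.empty, st.2 + PySem.Set.len st.1)
      else (PySem.Set.add st.1 log, st.2))
    (PySem.Set.empty, 0)
  st.2 + PySem.Set.len st.1

-- ===== PORT B =====
-- phase 1: split into sessions (lists of raw greetings between ENTERs)
def cgSplitSessions (logs : List String) : List (List String) × List String :=
  logs.foldl
    (fun (acc : List (List String) × List String) log =>
      if log == "ENTER" then (acc.1 ++ [acc.2], [])
      else (acc.1, acc.2 ++ [log]))
    ([], [])

-- phase 2: sum of len(set(session)) over all sessions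
def count_greetings_alt (logs : List String) : Int :=
  let p := cgSplitSessions logs
  ((p.1 ++ [p.2]).map (fun s => (PySem.Set.len (PySem.Set.ofList s) : Int))).sum

-- ===== PRECONDITION & SPEC =====
def Spec_count_greetings (logs : List String) (out : Int) : Prop := out = count_greetings_alt logs
instance (logs : List String) (out : Int) : Decidable (Spec_count_greetings logs out) := by unfold Spec_count_greetings; infer_instance

-- ===== CLAIM (what is proved, stated in full; the proofs are below) =====
def Claim_equal_count_greetings : Prop := ∀ (logs : List String), Dom_count_greetings logs → Spec_count_greetings logs (count_greetings logs)

-- ===== LEMMAS AND PROOFS =====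

-- Invariant relating A's running state to B's: A's set is set(current) and A's total is the sum over finished sessions.
theorem cg_fold_equiv (logs : List String) (sessions : List (List String)) (current : List String) (tot : Int)
    (h : tot = (sessions.map (fun s => (PySem.Set.len (PySem.Set.ofList s) : Int))).sum) :
    ((logs.foldl
        (fun (st : PySem.Set String × Int) log =>
          if log == "ENTER" then (PySem.Set.empty, st.2 + PySem.Set.len st.1)
          else (PySem.Set.add st.1 log, st.2))
        (PySem.Set.ofList current, tot)).2
     + PySem.Set.len (logs.foldl
        (fun (st : PySem.Set String × Int) log =>
          if log == "ENTER" then (PySem.Set.empty, st.2 + PySem.Set.len st.1)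
          else (PySem.Set.add st.1 log, st.2))
        (PySem.Set.ofList current, tot)).1)
    =
    ((((logs.foldl
        (fun (acc : List (List String) × List String) log =>
          if log == "ENTER" then (acc.1 ++ [acc.2], [])
          else (acc.1, acc.2 ++ [log]))
        (sessions, current)).1 ++ [(logs.foldl
        (fun (acc : List (List String) × List String) log =>
          if log == "ENTER" then (acc.1 ++ [acc.2], [])
          else (acc.1, acc.2 ++ [log]))
        (sessions, current)).2]).map (fun s => (PySem.Set.len (PySem.Set.ofList s) : Int))).sum) := by
  induction logs generalizing sessions current tot with
  | nil =>
    simp [h, List.map_append]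
  | cons log rest ih =>
    by_cases hl : log = "ENTER"
    · subst hl
      simp only [List.foldl_cons, beq_self_eq_true, if_true]
      have := ih (sessions ++ [current]) [] (tot + PySem.Set.len (PySem.Set.ofList current))
        (by simp [h, List.map_append])
      simpa [PySem.Set.ofList, PySem.Set.empty] using this
    · have := ih sessions (current ++ [log]) tot h
      have hofs : PySem.Set.ofList (current ++ [log]) = PySem.Set.add (PySem.Set.ofList current) log := by
        simp [PySem.Set.ofList_eq_foldl]
      rw [hofs] at this
      simpa [List.foldl_cons, hl] using this

-- ===== VERDICT (by name: the statement is the Claim_ definition above) =====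
theorem count_greetings_spec : Claim_equal_count_greetings := by
  intro logs _
  unfold Spec_count_greetings count_greetings count_greetings_alt cgSplitSessions
  have := cg_fold_equiv logs [] [] 0 (by simp)
  simpa [PySem.Set.ofList, PySem.Set.empty] using this
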